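-- pv_equiv track=rewrite | github.com/romeorizzi/SfideUniVR | archivio/problemi/muro/solutions/codes/muro.py | opt_sort
-- ===== SOURCE A (Python) =====
-- def opt_sort(n, L):
--     count_lengths = [0] * (n+1)
--     for L_i in L:
--         count_lengths[L_i] += 1
--     num_exposed = 0
--     for length in range(n,-1,-1):
--         for _ in range(count_lengths[length]):
--             if num_exposed + length <= n:
--                 num_exposed += 1
--     return num_exposed
-- ===== SOURCE B (Python) =====
-- def opt_sort(n, L):
--     count_lengths = [0] * (n + 1)
--     for L_i in L:
--         count_lengths[L_i] += 1
--     best = len(L)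
--     shorter = 0
--     for length in range(n + 1):
--         cap = n - length + 1 + shorter
--         if cap < best:
--             best = cap
--         shorter += count_lengths[length]
--     return best
-- ===== Notes on version B (the rewrite author's own statement) =====
-- stated objective: alternative
-- what changed: B keeps the counting-array build but replaces A's descending greedy simulation (one iteration per wall, nested in a per-length loop) by a single ascending pass computing the closed form min(len(L), min_k(n-k+1+#walls shorter than k)).
import Mathlib
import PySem

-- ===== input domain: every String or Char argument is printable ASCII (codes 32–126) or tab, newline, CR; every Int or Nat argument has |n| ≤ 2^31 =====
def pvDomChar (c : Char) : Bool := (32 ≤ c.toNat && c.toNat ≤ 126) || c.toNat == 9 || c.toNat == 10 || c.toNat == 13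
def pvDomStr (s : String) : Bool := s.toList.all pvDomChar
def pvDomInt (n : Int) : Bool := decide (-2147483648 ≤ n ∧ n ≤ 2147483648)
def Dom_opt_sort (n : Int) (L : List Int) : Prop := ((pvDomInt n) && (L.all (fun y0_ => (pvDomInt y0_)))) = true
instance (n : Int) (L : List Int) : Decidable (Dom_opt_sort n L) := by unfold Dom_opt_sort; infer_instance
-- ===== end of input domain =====

-- B keeps A's counting-array build but replaces the descending per-wall greedy with one
-- ascending pass computing the closed form min(len(L), min_k (n-k+1 + #walls shorter than k));
-- alternative decomposition, same asymptotic cost.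


-- ===== PORT A =====
-- list-cell read/update with Python index semantics, on an Array so that evaluation is O(1)
-- per access: exact counterparts of PySem.List.pyGetD/pySetD (same index resolution via
-- PySem.List.pyIdx?; out-of-range = Python's IndexError, excluded by Pre_, leaves the default /
-- the array unchanged) — proved equal to the PySem list primitives in pvAGetD_eq/pvASetD_toList
def pvAGetD (a : Array Int) (i : Int) (d : Int) : Int :=
  match PySem.List.pyIdx? a.size i with
  | some k => a.getD k d
  | none => d

def pvASetD (a : Array Int) (i : Int) (v : Int) : Array Int :=
  match PySem.List.pyIdx? a.size i with
  | some k => a.setIfInBounds k v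
  | none => a

-- shared by both ports: the counting-array build 'count_lengths = [0]*(n+1); for L_i in L:
-- count_lengths[L_i] += 1' (identical source text in Source A and Source B)
def pvBuildCounts (n : Int) (L : List Int) : Array Int :=
  L.foldl (fun cs x => pvASetD cs x (pvAGetD cs x 0 + 1))
    (Array.replicate (n + 1).toNat 0)

def opt_sort (n : Int) (L : List Int) : Int :=
  let count_lengths := pvBuildCounts n L
  (PySem.List.pyRange n (-1) (-1)).foldl
    (fun num_exposed length =>
      (PySem.List.pyRange 0 (pvAGetD count_lengths length 0) 1).foldl
        (fun num_exposed _ => if num_exposed + length ≤ n then num_exposed + 1 else num_exposed)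
        num_exposed)
    0

-- ===== PORT B =====
def opt_sort_alt (n : Int) (L : List Int) : Int :=
  let count_lengths := pvBuildCounts n L
  ((PySem.List.pyRange 0 (n + 1) 1).foldl
    (fun st length =>
      (if n - length + 1 + st.2 < st.1 then n - length + 1 + st.2 else st.1,
       st.2 + pvAGetD count_lengths length 0))
    ((L.length : Int), 0)).1

-- ===== PRECONDITION & SPEC =====
-- Pre_ excludes exactly the inputs where the shared counting build raises IndexError
-- (some L_i outside the valid index range of the (n+1)-element list); both A and B raise there.
def Pre_opt_sort (n : Int) (L : List Int) : Prop := ∀ x ∈ L, -(n + 1) ≤ x ∧ x ≤ n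
instance (n : Int) (L : List Int) : Decidable (Pre_opt_sort n L) := by unfold Pre_opt_sort; infer_instance

def pvWitness_opt_sort : Int × List Int := (3, [3, 1, -1])

def Spec_opt_sort (n : Int) (L : List Int) (out : Int) : Prop := out = opt_sort_alt n L
instance (n : Int) (L : List Int) (out : Int) : Decidable (Spec_opt_sort n L out) := by unfold Spec_opt_sort; infer_instance

-- ===== CLAIM (what is proved, stated in full; the proofs are below) =====
def Claim_equal_opt_sort : Prop := ∀ (n : Int) (L : List Int), Dom_opt_sort n L → Pre_opt_sort n L → Spec_opt_sort n L (opt_sort n L)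

-- ===== LEMMAS AND PROOFS =====

-- min over k = 0..m of (n - k + 1 + sum of counts of lengths < k): the common closed form
def pvMspec (n : Int) (cs : List Int) : Nat → Int
  | 0 => n + 1
  | m + 1 => min (pvMspec n cs m) (n - (m + 1) + 1 + (cs.take (m + 1)).sum)

lemma pvAGetD_eq (a : Array Int) (i d : Int) :
    pvAGetD a i d = PySem.List.pyGetD a.toList i d := by
  unfold pvAGetD PySem.List.pyGetD PySem.List.pyGet?
  cases h : PySem.List.pyIdx? a.size i with
  | none => rfl
  | some k =>
    simp only [Option.bind_some]
    simp [Array.getD]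
    split_ifs with hk
    · simp [hk]
    · simp [Nat.le_of_not_lt hk]

lemma pvASetD_toList (a : Array Int) (i v : Int) :
    (pvASetD a i v).toList = PySem.List.pySetD a.toList i v := by
  unfold pvASetD PySem.List.pySetD PySem.List.pySet?
  cases h : PySem.List.pyIdx? a.size i with
  | none => rfl
  | some k => simp [Array.toList_setIfInBounds]

-- proof-side list twin of the Array-backed counting build
def pvBuildCountsL (n : Int) (L : List Int) : List Int :=
  L.foldl (fun cs x => PySem.List.pySetD cs x (PySem.List.pyGetD cs x 0 + 1))
    (List.replicate (n + 1).toNat 0)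

lemma pvFoldArr_toList (L : List Int) : ∀ a : Array Int,
    (L.foldl (fun cs x => pvASetD cs x (pvAGetD cs x 0 + 1)) a).toList
      = L.foldl (fun cs x => PySem.List.pySetD cs x (PySem.List.pyGetD cs x 0 + 1)) a.toList := by
  induction L with
  | nil => intro a; rfl
  | cons b t ih =>
    intro a
    rw [List.foldl_cons, List.foldl_cons, ih, pvASetD_toList, pvAGetD_eq]

lemma pvBuild_toList (n : Int) (L : List Int) :
    (pvBuildCounts n L).toList = pvBuildCountsL n L := by
  unfold pvBuildCounts pvBuildCountsL
  rw [pvFoldArr_toList]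
  simp

-- 'xs[i] += 1' at an in-range (possibly negative) index is a set at the resolved position
lemma pvBump (xs : List Int) (i : Int) (h : PySem.Raise.InRange xs.length i) :
    ∃ k : Nat, k < xs.length ∧
      PySem.List.pySetD xs i (PySem.List.pyGetD xs i 0 + 1) = xs.set k (xs.getD k 0 + 1) := by
  obtain ⟨h1, h2⟩ := h
  by_cases hi : 0 ≤ i
  · refine ⟨i.toNat, by omega, ?_⟩
    have hk : i.toNat < xs.length := by omega
    simp [PySem.List.pySetD, PySem.List.pySet?, PySem.List.pyGetD, PySem.List.pyGet?,
      PySem.List.pyIdx?, hi, h2]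
  · refine ⟨xs.length - (-i).toNat, by omega, ?_⟩
    have hk : xs.length - (-i).toNat < xs.length := by omega
    simp [PySem.List.pySetD, PySem.List.pySet?, PySem.List.pyGetD, PySem.List.pyGet?,
      PySem.List.pyIdx?, hi, h1]

lemma pvSumBump (xs : List Int) (k : Nat) (hk : k < xs.length) :
    (xs.set k (xs.getD k 0 + 1)).sum = xs.sum + 1 := by
  have hx : xs.sum = (xs.take k).sum + (xs.drop k).sum := by
    rw [← List.sum_append, List.take_append_drop]
  have hd : (xs.drop k).sum = xs[k] + (xs.drop (k + 1)).sum := by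
    rw [List.drop_eq_getElem_cons hk, List.sum_cons]
  rw [List.sum_set, if_pos hk, List.getD_eq_getElem _ _ hk, hx, hd]
  ring

lemma pvSetD_mem {y : Int} (xs : List Int) (i v : Int) (hy : y ∈ PySem.List.pySetD xs i v) :
    y ∈ xs ∨ y = v := by
  unfold PySem.List.pySetD PySem.List.pySet? at hy
  cases h : PySem.List.pyIdx? xs.length i with
  | none => rw [h] at hy; simp at hy; exact Or.inl hy
  | some k => rw [h] at hy; simp at hy; exact List.mem_or_eq_of_mem_set hy

lemma pvGetD_nonneg (xs : List Int) (i : Int) (h : ∀ x ∈ xs, 0 ≤ x) :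
    0 ≤ PySem.List.pyGetD xs i 0 := by
  unfold PySem.List.pyGetD
  cases hg : PySem.List.pyGet? xs i with
  | none => simp
  | some a =>
    simp only [Option.getD_some]
    apply h
    unfold PySem.List.pyGet? at hg
    cases hk : PySem.List.pyIdx? xs.length i with
    | none => rw [hk] at hg; simp at hg
    | some k =>
      rw [hk] at hg; simp at hg
      exact List.mem_of_getElem? hg

lemma pvFold_length (L : List Int) : ∀ cs : List Int,
    (L.foldl (fun cs x => PySem.List.pySetD cs x (PySem.List.pyGetD cs x 0 + 1)) cs).length
      = cs.length := by
  induction L with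
  | nil => intro cs; rfl
  | cons a t ih =>
    intro cs
    rw [List.foldl_cons, ih]
    exact PySem.List.length_pySetD ..

lemma pvBuild_length (n : Int) (L : List Int) :
    (pvBuildCountsL n L).length = (n + 1).toNat := by
  unfold pvBuildCountsL
  rw [pvFold_length]
  exact List.length_replicate

lemma pvFold_nonneg (L : List Int) : ∀ cs : List Int, (∀ x ∈ cs, 0 ≤ x) →
    ∀ y ∈ L.foldl (fun cs x => PySem.List.pySetD cs x (PySem.List.pyGetD cs x 0 + 1)) cs, 0 ≤ y := by
  induction L with
  | nil => intro cs h; exact h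
  | cons a t ih =>
    intro cs h
    rw [List.foldl_cons]
    apply ih
    intro y hy
    rcases pvSetD_mem cs a _ hy with hm | he
    · exact h y hm
    · have := pvGetD_nonneg cs a h; omega

lemma pvBuild_nonneg (n : Int) (L : List Int) :
    ∀ x ∈ pvBuildCountsL n L, 0 ≤ x := by
  apply pvFold_nonneg
  intro x hx
  simp at hx
  omega

-- every wall increments some cell, so the counts sum to len(L)
lemma pvFold_sum (L : List Int) : ∀ cs : List Int,
    (∀ x ∈ L, PySem.Raise.InRange cs.length x) →
    (L.foldl (fun cs x => PySem.List.pySetD cs x (PySem.List.pyGetD cs x 0 + 1)) cs).sum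
      = cs.sum + L.length := by
  induction L with
  | nil => intro cs _; simp
  | cons a t ih =>
    intro cs h
    rw [List.foldl_cons]
    obtain ⟨k, hk, heq⟩ := pvBump cs a (h a (by simp))
    rw [ih _ (by
      intro x hx
      rw [PySem.List.length_pySetD]
      exact h x (by simp [hx]))]
    rw [heq, pvSumBump cs k hk]
    simp
    omega

-- A's inner per-wall loop run m times from num is capped growth: min (num+m) (n-ℓ+1)
lemma pvInnerIter (n ℓ : Int) (m : Nat) (num : Int) (h : num ≤ n - ℓ + 1) :
    (List.range m).foldl (fun a _ => if a + ℓ ≤ n then a + 1 else a) num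
      = min (num + m) (n - ℓ + 1) := by
  induction m with
  | zero => simp; omega
  | succ m ih =>
    rw [List.range_succ, List.foldl_append, ih]
    simp only [List.foldl_cons, List.foldl_nil]
    push_cast
    split_ifs <;> omega

lemma pvInner (n ℓ c num : Int) (hc : 0 ≤ c) (h : num ≤ n - ℓ + 1) :
    (PySem.List.pyRange 0 c 1).foldl (fun a _ => if a + ℓ ≤ n then a + 1 else a) num
      = min (num + c) (n - ℓ + 1) := by
  rw [PySem.List.pyRange_one, List.foldl_map]
  have := pvInnerIter n ℓ (c - 0).toNat num h
  rw [this]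
  congr 1
  omega

lemma pvTakeSum (cs : List Int) (m : Nat) (hm : m < cs.length) :
    (cs.take (m + 1)).sum = (cs.take m).sum + cs[m] := by
  rw [List.take_add_one, List.sum_append, List.getElem?_eq_getElem hm]
  simp

-- A's descending outer loop from length ℓ equals the closed form
lemma pvAdesc (n : Int) (cs : List Int) (hlen : cs.length = (n + 1).toNat)
    (hpos : ∀ x ∈ cs, 0 ≤ x) (ℓ : Nat) (hℓ : (ℓ : Int) ≤ n) (num : Int)
    (hnum : num ≤ n - ℓ) :
    (PySem.List.pyRange ℓ (-1) (-1)).foldl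
      (fun num_exposed length =>
        (PySem.List.pyRange 0 (PySem.List.pyGetD cs length 0) 1).foldl
          (fun a _ => if a + length ≤ n then a + 1 else a) num_exposed)
      num
    = min (num + (cs.take (ℓ + 1)).sum) (pvMspec n cs ℓ) := by
  induction ℓ generalizing num with
  | zero =>
    rw [PySem.List.pyRange_neg_one_cons (by norm_num), show ((0:Nat):Int) - 1 = -1 by norm_num,
      PySem.List.pyRange_neg_one_eq_nil (by norm_num)]
    have h0 : (0:Nat) < cs.length := by omega
    rw [List.foldl_cons, List.foldl_nil]
    rw [show PySem.List.pyGetD cs ((0:Nat):Int) 0 = cs[0] by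
      rw [PySem.List.pyGetD_natCast]; exact List.getD_eq_getElem _ _ h0]
    rw [pvInner n _ _ _ (hpos _ (by simp [List.getElem_mem])) (by push_cast at hnum ⊢; omega)]
    rw [pvTakeSum cs 0 h0]
    simp only [pvMspec, List.take_zero, List.sum_nil, Nat.cast_zero]
    omega
  | succ ℓ ih =>
    have hidx : ℓ + 1 < cs.length := by omega
    rw [PySem.List.pyRange_neg_one_cons (by push_cast; omega)]
    rw [List.foldl_cons]
    rw [show PySem.List.pyGetD cs ((ℓ+1:Nat):Int) 0 = cs[ℓ+1] by
      rw [PySem.List.pyGetD_natCast]; exact List.getD_eq_getElem _ _ hidx]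
    rw [pvInner n _ _ _ (hpos _ (by simp [List.getElem_mem])) (by push_cast at hnum ⊢; omega)]
    rw [show ((ℓ+1:Nat):Int) - 1 = ((ℓ:Nat):Int) by push_cast; ring]
    rw [ih (by push_cast at hℓ ⊢; omega) _ (by push_cast at hnum ⊢; omega)]
    rw [pvTakeSum cs (ℓ+1) hidx]
    simp only [pvMspec]
    push_cast
    omega

-- B's ascending loop keeps (running min of caps, sum of counts seen) as its state
lemma pvBasc (n : Int) (cs : List Int) (init : Int) (m : Nat) (hm : m < cs.length) :
    (PySem.List.pyRange 0 ((m : Int) + 1) 1).foldl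
      (fun st length =>
        (if n - length + 1 + st.2 < st.1 then n - length + 1 + st.2 else st.1,
         st.2 + PySem.List.pyGetD cs length 0))
      (init, 0)
    = (min init (pvMspec n cs m), (cs.take (m + 1)).sum) := by
  induction m with
  | zero =>
    rw [show ((0:Nat):Int) + 1 = 0 + 1 by norm_num, PySem.List.pyRange_one_singleton]
    have h0 : (0:Nat) < cs.length := by omega
    rw [List.foldl_cons, List.foldl_nil]
    rw [show PySem.List.pyGetD cs (0:Int) 0 = cs[0] by
      rw [show (0:Int) = ((0:Nat):Int) by norm_num, PySem.List.pyGetD_natCast]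
      exact List.getD_eq_getElem _ _ h0]
    rw [pvTakeSum cs 0 h0]
    simp only [pvMspec, List.take_zero, List.sum_nil]
    refine Prod.ext ?_ rfl
    simp only
    split_ifs <;> omega
  | succ m ih =>
    have hm' : m < cs.length := by omega
    rw [show ((m+1:Nat):Int) + 1 = (((m:Nat):Int) + 1) + 1 by push_cast; ring,
      PySem.List.pyRange_one_succ_right (by positivity), List.foldl_append, ih hm']
    rw [List.foldl_cons, List.foldl_nil]
    have hidx : m + 1 < cs.length := by omega
    rw [show PySem.List.pyGetD cs ((m:Int)+1) 0 = cs[m+1] by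
      rw [show ((m:Int)+1) = ((m+1:Nat):Int) by push_cast; ring, PySem.List.pyGetD_natCast]
      exact List.getD_eq_getElem _ _ hidx]
    rw [pvTakeSum cs (m+1) hidx]
    simp only [pvMspec]
    refine Prod.ext ?_ rfl
    simp only
    split_ifs <;> omega

-- ===== VERDICT (by name: the statement is the Claim_ definition above) =====
theorem opt_sort_spec : Claim_equal_opt_sort := by
  intro n L _ hpre
  unfold Spec_opt_sort
  by_cases hn : 0 ≤ n
  · obtain ⟨m, rfl⟩ := Int.eq_ofNat_of_zero_le hn
    have hlen : (pvBuildCountsL (m:Int) L).length = m + 1 := by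
      rw [pvBuild_length]; omega
    have hpos := pvBuild_nonneg (m:Int) L
    have hsum : (pvBuildCountsL (m:Int) L).sum = L.length := by
      unfold pvBuildCountsL
      rw [pvFold_sum L _ (by
        intro x hx
        have := hpre x hx
        constructor <;> [skip; skip] <;> simp [List.length_replicate] <;> omega)]
      simp
    have e1 : opt_sort (m:Int) L
        = min (0 + ((pvBuildCountsL (m:Int) L).take (m + 1)).sum) (pvMspec (m:Int) (pvBuildCountsL (m:Int) L) m) := by
      show (PySem.List.pyRange (m:Int) (-1) (-1)).foldl
        (fun num_exposed length =>
          (PySem.List.pyRange 0 (pvAGetD (pvBuildCounts (m:Int) L) length 0) 1).foldl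
            (fun a _ => if a + length ≤ (m:Int) then a + 1 else a) num_exposed) 0 = _
      simp only [pvAGetD_eq, pvBuild_toList]
      exact pvAdesc (m:Int) _ (by rw [pvBuild_length]) hpos m le_rfl 0 (by omega)
    have e2 : opt_sort_alt (m:Int) L
        = min ((L.length : Int)) (pvMspec (m:Int) (pvBuildCountsL (m:Int) L) m) := by
      show ((PySem.List.pyRange 0 ((m:Int) + 1) 1).foldl
        (fun st length =>
          (if (m:Int) - length + 1 + st.2 < st.1 then (m:Int) - length + 1 + st.2 else st.1,
           st.2 + pvAGetD (pvBuildCounts (m:Int) L) length 0))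
        ((L.length : Int), 0)).1 = _
      simp only [pvAGetD_eq, pvBuild_toList]
      rw [pvBasc (m:Int) _ ((L.length : Int)) m (by omega)]
    rw [e1, e2, List.take_of_length_le (by omega), hsum]
    omega
  · have hL : L = [] := by
      cases L with
      | nil => rfl
      | cons a t =>
        exfalso
        have := hpre a (by simp)
        omega
    subst hL
    show (PySem.List.pyRange n (-1) (-1)).foldl _ 0
      = ((PySem.List.pyRange 0 (n + 1) 1).foldl _ (((List.length ([] : List Int)) : Int), 0)).1
    rw [PySem.List.pyRange_neg_one_eq_nil (by omega), PySem.List.pyRange_one_eq_nil (by omega)]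
    simp
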